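-- pv_equiv track=rewrite | github.com/Joldnine/bayesian-network | d-sep.py | get_obs_anc
-- ===== SOURCE A (Python) =====
-- def get_obs_anc(graph, observed):
--     # copy observed
--     visit_nodes = []
--     for o in observed:
--         visit_nodes.append(o)
--     ancestors = set()
--
--     while len(visit_nodes) > 0:
--         node = visit_nodes.pop()
--         for parent in find_parents(graph, node):
--             ancestors.add(parent)
--             visit_nodes.append(parent)
--     return list(ancestors)
--
-- def find_parents(graph, node):
--     parents = []
--     for key, value in graph.items():
--         if node in graph[key]:
--             parents.append(key)
--     return parents
-- ===== SOURCE B (Python) =====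
-- def get_obs_anc(graph, observed):
--     # Build the reverse-adjacency index once: rev[child] = [keys whose value
--     # list contains child], in dict order.  The per-pop scan of the whole
--     # graph (find_parents) disappears; the traversal itself is unchanged.
--     rev = {}
--     for key, children in graph.items():
--         for c in dict.fromkeys(children):
--             rev.setdefault(c, []).append(key)
--
--     visit_nodes = list(observed)
--     ancestors = set()
--     while len(visit_nodes) > 0:
--         node = visit_nodes.pop()
--         parents = rev.get(node, [])
--         for p in parents:
--             ancestors.add(p)
--         visit_nodes.extend(parents)
--     return list(ancestors)
-- ===== Notes on version B (the rewrite author's own statement) =====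
-- stated objective: faster
-- what changed: B builds a reverse-adjacency index (child -> list of its parents) in one pass over the dict, so the inner find_parents pass, which rescanned every item of the graph on every stack pop, disappears; the upward traversal and its output are unchanged.
import Mathlib
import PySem

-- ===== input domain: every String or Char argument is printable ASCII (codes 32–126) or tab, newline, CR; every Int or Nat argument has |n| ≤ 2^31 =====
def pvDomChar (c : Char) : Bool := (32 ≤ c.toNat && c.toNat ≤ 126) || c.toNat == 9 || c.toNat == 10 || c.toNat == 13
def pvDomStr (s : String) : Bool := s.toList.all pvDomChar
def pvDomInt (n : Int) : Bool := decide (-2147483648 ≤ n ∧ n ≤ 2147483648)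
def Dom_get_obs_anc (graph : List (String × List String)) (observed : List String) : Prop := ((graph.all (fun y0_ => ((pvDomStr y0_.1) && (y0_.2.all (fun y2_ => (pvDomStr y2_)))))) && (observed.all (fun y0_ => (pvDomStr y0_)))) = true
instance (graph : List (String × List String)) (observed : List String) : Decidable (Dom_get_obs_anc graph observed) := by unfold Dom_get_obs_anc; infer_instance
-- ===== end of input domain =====

-- B replaces A's per-pop full-graph scan (find_parents) by a reverse-adjacency
-- index built once; the traversal is unchanged, so the returned value is equal.
-- Both while-loops are ported with the same fuel bound, large enough whenever the
-- Python loop terminates (no parent-cycle reachable from observed); on other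
-- inputs both Pythons diverge identically and the equal ports stop on fuel.

-- ===== PORT A =====

-- find_parents: scan all items, 'node in graph[key]' (graph[key] = first-match
-- lookup; the key comes from items, so the lookup never raises: .getD [] is unreachable)
def findParents (d : PySem.Dict String (List String)) (node : String) : List String :=
  d.items.foldl
    (fun parents kv => if node ∈ ((d.get? kv.1).getD []) then parents ++ [kv.1] else parents) []

-- the while-loop of A; fuel only makes the recursion total (Python: loop until stack empty)
def loopA (d : PySem.Dict String (List String)) :
    Nat → List String → PySem.Set String → PySem.Set String
  | 0, _, anc => anc
  | fuel + 1, st, anc =>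
    match PySem.List.pop? st (-1) with      -- visit_nodes.pop()
    | none => anc                            -- len(visit_nodes) == 0: exit loop
    | some (node, rest) =>
        let s := (findParents d node).foldl
          (fun (acc : PySem.Set String × List String) p =>
            (PySem.Set.add acc.1 p, acc.2 ++ [p])) (anc, rest)
        loopA d fuel s.2 s.1

def pvFuel (graph : List (String × List String)) (observed : List String) : Nat :=
  (observed.length + 1) * (graph.length + 2) ^ (graph.length + 2)

def get_obs_anc (graph : List (String × List String)) (observed : List String) : List String :=
  let d := PySem.Dict.ofList graph
  let visit_nodes := observed.foldl (fun acc o => acc ++ [o]) []   -- copy observed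
  loopA d (pvFuel graph observed) visit_nodes PySem.Set.empty      -- list(ancestors): a Set IS its list

-- ===== PORT B =====

-- rev.setdefault(c, []).append(key)  ≡  rev[c] = rev.get(c, []) ++ [key]  (= Dict.modify)
def buildRev (items : List (String × List String)) : PySem.Dict String (List String) :=
  items.foldl
    (fun rev kv => (PySem.List.dedup kv.2).foldl
      (fun rev c => PySem.Dict.modify rev c [] (fun l => l ++ [kv.1])) rev)
    PySem.Dict.empty

def loopB (rev : PySem.Dict String (List String)) :
    Nat → List String → PySem.Set String → PySem.Set String
  | 0, _, anc => anc
  | fuel + 1, st, anc =>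
    match PySem.List.pop? st (-1) with
    | none => anc
    | some (node, rest) =>
        let parents := rev.getD node []      -- rev.get(node, [])
        loopB rev fuel (rest ++ parents) (parents.foldl PySem.Set.add anc)

def get_obs_anc_alt (graph : List (String × List String)) (observed : List String) : List String :=
  let d := PySem.Dict.ofList graph
  let rev := buildRev d.items
  loopB rev (pvFuel graph observed) observed PySem.Set.empty

-- ===== PRECONDITION & SPEC =====

def Spec_get_obs_anc (graph : List (String × List String)) (observed : List String) (out : List String) : Prop := out = get_obs_anc_alt graph observed
instance (graph : List (String × List String)) (observed : List String) (out : List String) : Decidable (Spec_get_obs_anc graph observed out) := by unfold Spec_get_obs_anc; infer_instance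

-- ===== CLAIM (what is proved, stated in full; the proofs are below) =====
def Claim_equal_get_obs_anc : Prop := ∀ (graph : List (String × List String)) (observed : List String), Dom_get_obs_anc graph observed → Spec_get_obs_anc graph observed (get_obs_anc graph observed)

-- ===== LEMMAS AND PROOFS =====

-- B's index, read at x, lists exactly the keys whose (deduplicated) value list
-- contains x — first: the inner fold over one deduplicated value list.
theorem getD_foldl_modify_append {k : String} {rev : PySem.Dict String (List String)}
    (cs : List String) (hnd : cs.Nodup) (x : String) :
    ((cs.foldl (fun rev c => PySem.Dict.modify rev c [] (fun l => l ++ [k])) rev).getD x [])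
      = rev.getD x [] ++ (if x ∈ cs then [k] else []) := by
  induction cs generalizing rev with
  | nil => simp
  | cons c cs ih =>
    rcases List.nodup_cons.mp hnd with ⟨hc, hnd'⟩
    rw [List.foldl_cons, ih hnd']
    by_cases hx : x = c
    · subst hx
      rw [PySem.Dict.getD_modify_self]
      simp [hc]
    · rw [PySem.Dict.getD_modify]
      simp [hx]

theorem buildRev_getD (items : List (String × List String)) (x : String) :
    (buildRev items).getD x []
      = items.foldl (fun acc kv => if x ∈ kv.2 then acc ++ [kv.1] else acc) [] := by
  unfold buildRev
  suffices h : ∀ (rev : PySem.Dict String (List String)) (acc : List String),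
      rev.getD x [] = acc →
      ((items.foldl (fun rev kv => (PySem.List.dedup kv.2).foldl
          (fun rev c => PySem.Dict.modify rev c [] (fun l => l ++ [kv.1])) rev) rev).getD x [])
        = items.foldl (fun acc kv => if x ∈ kv.2 then acc ++ [kv.1] else acc) acc by
    exact h PySem.Dict.empty [] (PySem.Dict.getD_empty x [])
  induction items with
  | nil => intro rev acc h; simpa using h
  | cons kv items ih =>
    intro rev acc h
    rw [List.foldl_cons, List.foldl_cons]
    apply ih
    rw [getD_foldl_modify_append (PySem.List.dedup kv.2) (PySem.List.nodup_dedup kv.2) x, h]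
    by_cases hx : x ∈ kv.2
    · simp [hx]
    · simp [hx]

-- A's find_parents computes the same list (the dict's keys are nodup, so the
-- lookup graph[key] returns that very item's value).
theorem findParents_eq (d : PySem.Dict String (List String)) (hnd : d.keys.Nodup) (x : String) :
    findParents d x
      = d.items.foldl (fun acc kv => if x ∈ kv.2 then acc ++ [kv.1] else acc) [] := by
  unfold findParents
  apply PySem.List.foldl_congr_mem
  intro acc kv hkv
  have : d.get? kv.1 = some kv.2 := PySem.Dict.get?_of_mem_items d hkv hnd
  rw [this]
  rfl

-- one A-step over the pair accumulator is: the Set fold, and appending to the stack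
theorem stepA_pair (pr : List String) (anc : PySem.Set String) (rest : List String) :
    pr.foldl (fun (acc : PySem.Set String × List String) p =>
        (PySem.Set.add acc.1 p, acc.2 ++ [p])) (anc, rest)
      = (pr.foldl PySem.Set.add anc, rest ++ pr) := by
  rw [PySem.List.foldl_prod_mk (f := PySem.Set.add) (g := fun acc p => acc ++ [p]),
      PySem.List.foldl_append_singleton]

-- the two loops step identically
theorem loopA_eq_loopB (d : PySem.Dict String (List String)) (hnd : d.keys.Nodup)
    (fuel : Nat) (st : List String) (anc : PySem.Set String) :
    loopA d fuel st anc = loopB (buildRev d.items) fuel st anc := by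
  induction fuel generalizing st anc with
  | zero => rfl
  | succ fuel ih =>
    rw [loopA, loopB]
    cases hpop : PySem.List.pop? st (-1) with
    | none => rfl
    | some r =>
      simp only
      rw [stepA_pair, findParents_eq d hnd, ← buildRev_getD]
      exact ih _ _

-- ===== VERDICT (by name: the statement is the Claim_ definition above) =====
theorem get_obs_anc_spec : Claim_equal_get_obs_anc := by
  intro graph observed _
  unfold Spec_get_obs_anc get_obs_anc get_obs_anc_alt
  simp only [PySem.List.foldl_append_singleton, List.nil_append]
  exact loopA_eq_loopB _ (PySem.Dict.nodup_keys_ofList graph) _ _ _
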